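-- pv_equiv track=rewrite | github.com/tamsky/rhodecode-enterprise-ce | rhodecode/lib/codeblocks.py | rollup_tokenstream
-- ===== SOURCE A (Python) =====
-- from itertools import groupby
--
-- def rollup_tokenstream(tokenstream):
--     """
--     Group a token stream of the format:
--
--         ('class', 'op', 'text')
--     or
--         ('class', 'text')
--
--     into
--
--         [('class1',
--             [('op1', 'text'),
--              ('op2', 'text')]),
--          ('class2',
--             [('op3', 'text')])]
--
--     This is used to get the minimal tags necessary when
--     rendering to html eg for a token stream ie.
--
--     <span class="A"><ins>he</ins>llo</span>
--     vs
--     <span class="A"><ins>he</ins></span><span class="A">llo</span>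
--
--     If a 2 tuple is passed in, the output op will be an empty string.
--
--     eg:
--
--     >>> rollup_tokenstream([('classA', '',      'h'),
--                             ('classA', 'del',   'ell'),
--                             ('classA', '',      'o'),
--                             ('classB', '',      ' '),
--                             ('classA', '',      'the'),
--                             ('classA', '',      're'),
--                             ])
--
--     [('classA', [('', 'h'), ('del', 'ell'), ('', 'o')],
--      ('classB', [('', ' ')],
--      ('classA', [('', 'there')]]
--
--     """
--     if tokenstream and len(tokenstream[0]) == 2:
--         tokenstream = ((t[0], '', t[1]) for t in tokenstream)
--
--     result = []
--     for token_class, op_list in groupby(tokenstream, lambda t: t[0]):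
--         ops = []
--         for token_op, token_text_list in groupby(op_list, lambda o: o[1]):
--             text_buffer = []
--             for t_class, t_op, t_text in token_text_list:
--                 text_buffer.append(t_text)
--             ops.append((token_op, ''.join(text_buffer)))
--         result.append((token_class, ops))
--     return result
-- ===== SOURCE B (Python) =====
-- def rollup_tokenstream(tokenstream):
--     tokens = list(tokenstream)
--     if tokens and len(tokens[0]) == 2:
--         tokens = [(t[0], '', t[1]) for t in tokens]
--     if not tokens:
--         return []
--     result = []
--     ops = []
--     cur_cls, cur_op, first_text = tokens[0]
--     buf = [first_text]
--     for cls, op, text in tokens[1:]: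
--         if cls == cur_cls:
--             if op == cur_op:
--                 buf.append(text)
--             else:
--                 ops.append((cur_op, ''.join(buf)))
--                 buf = [text]
--                 cur_op = op
--         else:
--             ops.append((cur_op, ''.join(buf)))
--             result.append((cur_cls, ops))
--             ops = []
--             buf = [text]
--             cur_cls, cur_op = cls, op
--     ops.append((cur_op, ''.join(buf)))
--     result.append((cur_cls, ops))
--     return result
-- ===== Notes on version B (the rewrite author's own statement) =====
-- stated objective: simpler
-- what changed: Replaces the two nested itertools.groupby passes with a single explicit forward loop that tracks the current class, current op and a text buffer, flushing the op on op-change and the class group on class-change.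
import Mathlib
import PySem

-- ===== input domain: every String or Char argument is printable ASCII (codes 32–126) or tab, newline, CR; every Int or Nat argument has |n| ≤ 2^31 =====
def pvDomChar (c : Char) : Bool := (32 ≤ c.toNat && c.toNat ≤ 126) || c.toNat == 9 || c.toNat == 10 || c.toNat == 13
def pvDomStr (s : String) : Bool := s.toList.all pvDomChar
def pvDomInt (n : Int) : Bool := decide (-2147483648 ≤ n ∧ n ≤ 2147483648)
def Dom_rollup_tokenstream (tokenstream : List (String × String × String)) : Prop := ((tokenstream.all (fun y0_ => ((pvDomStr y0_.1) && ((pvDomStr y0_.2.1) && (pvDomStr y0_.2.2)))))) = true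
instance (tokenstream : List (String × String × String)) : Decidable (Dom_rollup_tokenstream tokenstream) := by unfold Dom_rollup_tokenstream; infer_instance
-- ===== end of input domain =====

-- B replaces the nested itertools.groupby passes by one explicit forward pass that tracks the
-- current class, current op and a text buffer, flushing on change (objective: simpler decomposition, same cost).

-- ===== PORT A =====
-- itertools.groupby(stream, key): consecutive runs with equal key, in order.
def pvGroupRuns {α β : Type} [DecidableEq β] (key : α → β) : List α → List (β × List α)
  | [] => []
  | x :: xs =>
      (key x, x :: xs.takeWhile (fun y => key y == key x)) ::
        pvGroupRuns key (xs.dropWhile (fun y => key y == key x))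
termination_by l => l.length
decreasing_by
  simp only [List.length_cons]
  exact Nat.lt_succ_of_le (List.length_dropWhile_le _ _)

-- inner loop of A: group one class chunk by op, joining the text buffers with ''.join
def pvInner (chunk : List (String × String × String)) : List (String × String) :=
  (pvGroupRuns (fun o => o.2.1) chunk).map
    (fun h => (h.1, PySem.Str.join "" (h.2.map (fun t => t.2.2))))

-- The input type is a list of 3-tuples, so Python's `len(tokenstream[0]) == 2`
-- normalization branch is never taken and is omitted.
def rollup_tokenstream (tokenstream : List (String × String × String)) : List (String × (List (String × String))) :=
  (pvGroupRuns (fun t => t.1) tokenstream).map (fun g => (g.1, pvInner g.2))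

-- ===== PORT B =====
-- the for-loop of Source B: state = (result, ops, buf, cur_cls, cur_op), flushing on class/op change
def pvLoop : List (String × String × String) → List (String × List (String × String)) → List (String × String) → List String → String → String → List (String × List (String × String))
  | [], result, ops, buf, c, o => result ++ [(c, ops ++ [(o, PySem.Str.join "" buf)])]
  | (cls, op, text) :: ts, result, ops, buf, c, o =>
      if cls = c then
        if op = o then pvLoop ts result ops (buf ++ [text]) c o
        else pvLoop ts result (ops ++ [(o, PySem.Str.join "" buf)]) [text] c op
      else pvLoop ts (result ++ [(c, ops ++ [(o, PySem.Str.join "" buf)])]) [] [text] cls op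

-- The input type is a list of 3-tuples, so Python's `len(tokens[0]) == 2`
-- normalization branch is never taken and is omitted.
def rollup_tokenstream_alt (tokenstream : List (String × String × String)) : List (String × (List (String × String))) :=
  match tokenstream with
  | [] => []
  | (cur_cls, cur_op, first_text) :: rest => pvLoop rest [] [] [first_text] cur_cls cur_op

-- ===== PRECONDITION & SPEC =====
def Spec_rollup_tokenstream (tokenstream : List (String × String × String)) (out : List (String × (List (String × String)))) : Prop := out = rollup_tokenstream_alt tokenstream
instance (tokenstream : List (String × String × String)) (out : List (String × (List (String × String)))) : Decidable (Spec_rollup_tokenstream tokenstream out) := by unfold Spec_rollup_tokenstream; infer_instance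

-- ===== CLAIM (what is proved, stated in full; the proofs are below) =====
def Claim_equal_rollup_tokenstream : Prop := ∀ (tokenstream : List (String × String × String)), Dom_rollup_tokenstream tokenstream → Spec_rollup_tokenstream tokenstream (rollup_tokenstream tokenstream)

-- ===== LEMMAS AND PROOFS =====

theorem pvStrJoin_cons (x : String) (l : List String) :
    PySem.Str.join "" (x :: l) = x ++ PySem.Str.join "" l := by
  cases l with
  | nil => simp [PySem.Str.join, PySem.Chars.join_singleton, PySem.Chars.join_nil]
  | cons b t => simp [PySem.Str.join, PySem.Chars.join_cons_cons]

theorem pvGroupRuns_cons {α β : Type} [DecidableEq β] (key : α → β) (x : α) (xs : List α) :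
    pvGroupRuns key (x :: xs) =
      match pvGroupRuns key xs with
      | [] => [(key x, [x])]
      | (k, g) :: r => if key x = k then (key x, x :: g) :: r else (key x, [x]) :: (k, g) :: r := by
  cases xs with
  | nil => simp [pvGroupRuns]
  | cons y ys =>
    by_cases h : key y = key x
    · have hfun : (fun z => key z == key x) = (fun z => key z == key y) := by
        funext z; rw [h]
      rw [pvGroupRuns, pvGroupRuns]
      simp [hfun, h]
    · rw [pvGroupRuns, pvGroupRuns]
      simp [h, Ne.symm h]
      rw [pvGroupRuns]

theorem pvInner_single (c o x : String) : pvInner [(c, o, x)] = [(o, x)] := by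
  simp [pvInner, pvGroupRuns, PySem.Str.join, PySem.Chars.join_singleton]

theorem pvInner_cons (c o x : String) (g : List (String × String × String)) :
    pvInner ((c, o, x) :: g) =
      match pvInner g with
      | [] => [(o, x)]
      | (o', s) :: l => if o = o' then (o, x ++ s) :: l else (o, x) :: (o', s) :: l := by
  rw [pvInner, pvGroupRuns_cons]
  cases hg : pvGroupRuns (fun t : String × String × String => t.2.1) g with
  | nil =>
    simp [pvInner, hg, PySem.Str.join, PySem.Chars.join_singleton]
  | cons p r =>
    obtain ⟨k, gr⟩ := p
    by_cases h : o = k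
    · simp [pvInner, hg, h, pvStrJoin_cons]
    · simp [pvInner, hg, h, PySem.Str.join, PySem.Chars.join_singleton]

theorem pvRollup_cons (c o x : String) (ts : List (String × String × String)) :
    rollup_tokenstream ((c, o, x) :: ts) =
      match rollup_tokenstream ts with
      | [] => [(c, [(o, x)])]
      | (c', ops) :: rest =>
        if c = c' then
          (c, match ops with
              | [] => [(o, x)]
              | (o', s) :: l => if o = o' then (o, x ++ s) :: l else (o, x) :: (o', s) :: l) :: rest
        else (c, [(o, x)]) :: (c', ops) :: rest := by
  rw [rollup_tokenstream, pvGroupRuns_cons]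
  cases hg : pvGroupRuns (fun t : String × String × String => t.1) ts with
  | nil =>
    simp [rollup_tokenstream, hg, pvInner_single]
  | cons p r =>
    obtain ⟨k, g⟩ := p
    by_cases h : c = k
    · subst h
      simp only [rollup_tokenstream, hg, if_true, List.map_cons]
      rw [pvInner_cons]
    · simp [rollup_tokenstream, hg, h, pvInner_single]

theorem pvStrJoin_single (x : String) : PySem.Str.join "" [x] = x := by
  simp [PySem.Str.join, PySem.Chars.join_singleton]

theorem pvStrJoin_append_singleton (buf : List String) (x : String) :
    PySem.Str.join "" (buf ++ [x]) = PySem.Str.join "" buf ++ x := by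
  induction buf with
  | nil => simp [PySem.Str.join, PySem.Chars.join_nil]
  | cons b t ih => rw [List.cons_append, pvStrJoin_cons, pvStrJoin_cons, ih, String.append_assoc]

theorem pvOpsNE (ts : List (String × String × String)) :
    ∀ p ∈ rollup_tokenstream ts, p.2 ≠ [] := by
  induction ts with
  | nil =>
    intro p hp
    simp [rollup_tokenstream, pvGroupRuns] at hp
  | cons t ts ih =>
    obtain ⟨c, o, x⟩ := t
    rw [pvRollup_cons]
    cases h : rollup_tokenstream ts with
    | nil =>
      intro p hp
      simp only [List.mem_singleton] at hp
      subst hp; simp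
    | cons q rest =>
      obtain ⟨c', ops⟩ := q
      have hq : ops ≠ [] := ih (c', ops) (h ▸ List.mem_cons_self ..)
      have hrest : ∀ q ∈ rest, q.2 ≠ [] := fun q hq => ih q (h ▸ List.mem_cons_of_mem _ hq)
      cases ops with
      | nil => exact absurd rfl hq
      | cons p2 l =>
        obtain ⟨o', s⟩ := p2
        intro p hp
        by_cases hc : c = c'
        · simp only [if_pos hc] at hp
          by_cases ho : o = o' <;> simp only [if_pos, ho] at hp <;>
            rcases List.mem_cons.mp hp with hp | hp
          · subst hp; simp
          · exact hrest p hp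
          · subst hp; simp
          · exact hrest p hp
        · simp only [if_neg hc] at hp
          rcases List.mem_cons.mp hp with hp | hp
          · subst hp; simp
          · rcases List.mem_cons.mp hp with hp | hp
            · subst hp; simp
            · exact hrest p hp

-- gluing the pending (class c, op list ops, open op o with text buffer buf) onto a rolled-up tail
def pvGlue (c o : String) (ops : List (String × String)) (buf : List String)
    (L : List (String × List (String × String))) : List (String × List (String × String)) :=
  match L with
  | [] => [(c, ops ++ [(o, PySem.Str.join "" buf)])]
  | (c', ops') :: r =>
    if c = c' then
      match ops' with
      | (o', s) :: l =>
          if o = o' then (c, ops ++ (o, PySem.Str.join "" buf ++ s) :: l) :: r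
          else (c, ops ++ (o, PySem.Str.join "" buf) :: (o', s) :: l) :: r
      | [] => (c, ops ++ [(o, PySem.Str.join "" buf)]) :: r   -- unreachable: ops lists are never empty
    else (c, ops ++ [(o, PySem.Str.join "" buf)]) :: (c', ops') :: r

theorem pvGlue_cons (c o x : String) (ts : List (String × String × String)) :
    pvGlue c o [] [x] (rollup_tokenstream ts) = rollup_tokenstream ((c, o, x) :: ts) := by
  rw [pvRollup_cons]
  cases h : rollup_tokenstream ts with
  | nil => simp [pvGlue, pvStrJoin_single]
  | cons q rest =>
    obtain ⟨c', ops⟩ := q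
    have hq : ops ≠ [] := pvOpsNE ts (c', ops) (h ▸ List.mem_cons_self ..)
    cases ops with
    | nil => exact absurd rfl hq
    | cons p2 l =>
      obtain ⟨o', s⟩ := p2
      by_cases hc : c = c' <;> by_cases ho : o = o' <;>
        simp [pvGlue, hc, ho, pvStrJoin_single]

theorem pvLoop_glue (ts : List (String × String × String)) :
    ∀ (result : List (String × List (String × String))) (ops : List (String × String))
      (buf : List String) (c o : String),
      pvLoop ts result ops buf c o = result ++ pvGlue c o ops buf (rollup_tokenstream ts) := by
  induction ts with
  | nil =>
    intro result ops buf c o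
    have hnil : rollup_tokenstream [] = [] := by
      simp [rollup_tokenstream, pvGroupRuns]
    rw [pvLoop, hnil, pvGlue]
  | cons t ts ih =>
    obtain ⟨c2, o2, x⟩ := t
    intro result ops buf c o
    rw [pvRollup_cons]
    by_cases hc2 : c2 = c
    · by_cases ho2 : o2 = o
      · -- same class, same op: extend the buffer
        subst hc2; subst ho2
        rw [pvLoop, if_pos rfl, if_pos rfl, ih]
        cases h : rollup_tokenstream ts with
        | nil => simp [pvGlue, pvStrJoin_append_singleton]
        | cons q rest =>
          obtain ⟨c', ops'⟩ := q
          have hq : ops' ≠ [] := pvOpsNE ts (c', ops') (h ▸ List.mem_cons_self ..)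
          cases ops' with
          | nil => exact absurd rfl hq
          | cons p2 l =>
            obtain ⟨o', s⟩ := p2
            by_cases hc : c2 = c' <;> by_cases ho : o2 = o' <;>
              simp [pvGlue, hc, ho, pvStrJoin_append_singleton,
                String.append_assoc]
      · -- same class, new op: flush the text buffer
        subst hc2
        rw [pvLoop, if_pos rfl, if_neg ho2, ih]
        cases h : rollup_tokenstream ts with
        | nil => simp [pvGlue, pvStrJoin_single, Ne.symm ho2]
        | cons q rest =>
          obtain ⟨c', ops'⟩ := q
          have hq : ops' ≠ [] := pvOpsNE ts (c', ops') (h ▸ List.mem_cons_self ..)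
          cases ops' with
          | nil => exact absurd rfl hq
          | cons p2 l =>
            obtain ⟨o', s⟩ := p2
            by_cases hc : c2 = c'
            · by_cases ho : o2 = o'
              · have hoo' : ¬ o = o' := fun hh => ho2 (ho.trans hh.symm)
                simp [pvGlue, hc, ho, pvStrJoin_single, hoo']
              · simp [pvGlue, hc, ho, pvStrJoin_single, Ne.symm ho2]
            · simp [pvGlue, hc, pvStrJoin_single, Ne.symm ho2]
    · -- new class: flush ops and the class group
      rw [pvLoop, if_neg hc2, ih]
      have hhead : pvGlue c o ops buf
          (match rollup_tokenstream ts with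
           | [] => [(c2, [(o2, x)])]
           | (c', ops') :: rest =>
             if c2 = c' then
               (c2, match ops' with
                    | [] => [(o2, x)]
                    | (o', s) :: l => if o2 = o' then (o2, x ++ s) :: l else (o2, x) :: (o', s) :: l) :: rest
             else (c2, [(o2, x)]) :: (c', ops') :: rest) =
          (c, ops ++ [(o, PySem.Str.join "" buf)]) ::
            (match rollup_tokenstream ts with
             | [] => [(c2, [(o2, x)])]
             | (c', ops') :: rest =>
               if c2 = c' then
                 (c2, match ops' with
                      | [] => [(o2, x)]
                      | (o', s) :: l => if o2 = o' then (o2, x ++ s) :: l else (o2, x) :: (o', s) :: l) :: rest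
               else (c2, [(o2, x)]) :: (c', ops') :: rest) := by
        cases h : rollup_tokenstream ts with
        | nil => simp [pvGlue, Ne.symm hc2]
        | cons q rest =>
          obtain ⟨c', ops'⟩ := q
          by_cases hcc : c2 = c'
          · have hcc' : ¬ c = c' := fun hh => hc2 (hcc.trans hh.symm)
            cases ops' with
            | nil => simp [pvGlue, hcc, hcc']
            | cons p2 l =>
              obtain ⟨o', s⟩ := p2
              by_cases ho : o2 = o' <;> simp [pvGlue, hcc, ho, hcc']
          · simp [pvGlue, hcc, Ne.symm hc2]
        -- NOTE (hhead): the head class of the rolled-up tail is c2 ≠ c, so pvGlue just conses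
      rw [hhead]
      have := pvGlue_cons c2 o2 x ts
      rw [pvRollup_cons] at this
      rw [this, List.append_assoc, List.singleton_append]

-- ===== VERDICT (by name: the statement is the Claim_ definition above) =====
theorem rollup_tokenstream_spec : Claim_equal_rollup_tokenstream := by
  intro ts _
  unfold Spec_rollup_tokenstream
  cases ts with
  | nil => simp [rollup_tokenstream, pvGroupRuns, rollup_tokenstream_alt]
  | cons t ts =>
    obtain ⟨c, o, x⟩ := t
    rw [rollup_tokenstream_alt, pvLoop_glue, List.nil_append, pvGlue_cons]
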